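-- pv_equiv track=rewrite | github.com/teyter/bioinfo | rosalind/problem10/solution10.py | bagmax
-- ===== SOURCE A (Python) =====
-- def bagmax(tli):
--     ret = []
--     currentMax = 0
--     for i in range(len(tli)):
--         nr = tli[i][0]
--         item = tli[i][1]
--         allt = tli[i] # debug
--         if nr > currentMax:
--             currentMax = nr
--             ret.clear()
--             ret.append(allt)
--         elif nr == currentMax:
--             ret.append(allt)
--     return ret
-- ===== SOURCE B (Python) =====
-- def bagmax(tli):
--     m = 0
--     for t in tli:
--         if t[0] > m:
--             m = t[0]
--     return [t for t in tli if t[0] == m]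
-- ===== Notes on version B (the rewrite author's own statement) =====
-- stated objective: simpler
-- what changed: Replaces A's single build-and-clear accumulator loop by two independent passes: one fold computing the running maximum (with A's 0 start), then a filter keeping tuples whose first component equals it.
import Mathlib
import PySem

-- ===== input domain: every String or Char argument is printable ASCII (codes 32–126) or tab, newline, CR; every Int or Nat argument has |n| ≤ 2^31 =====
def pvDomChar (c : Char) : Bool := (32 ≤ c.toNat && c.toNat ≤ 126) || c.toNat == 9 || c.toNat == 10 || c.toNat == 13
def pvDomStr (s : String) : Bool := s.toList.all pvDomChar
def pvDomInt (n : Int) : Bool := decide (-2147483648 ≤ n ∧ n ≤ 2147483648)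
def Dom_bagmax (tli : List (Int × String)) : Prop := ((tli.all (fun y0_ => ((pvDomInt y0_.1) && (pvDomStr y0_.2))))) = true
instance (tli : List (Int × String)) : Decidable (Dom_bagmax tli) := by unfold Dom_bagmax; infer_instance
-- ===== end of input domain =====

-- B splits A's single build-and-clear loop into a max-computing pass followed by a filter pass (objective: simpler).

-- ===== PORT A =====
-- A's loop over i in range(len(tli)), carrying ret and currentMax; ret.clear()+append on a new max.
def bagmaxLoop : List (Int × String) → List (Int × String) → Int → List (Int × String) × Int
  | [], ret, c => (ret, c)
  | t :: l, ret, c =>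
    if t.1 > c then bagmaxLoop l [t] t.1
    else if t.1 = c then bagmaxLoop l (ret ++ [t]) c
    else bagmaxLoop l ret c

def bagmax (tli : List (Int × String)) : List (Int × String) := (bagmaxLoop tli [] 0).1

-- ===== PORT B =====
def bagmax_alt (tli : List (Int × String)) : List (Int × String) :=
  let m := tli.foldl (fun m t => if t.1 > m then t.1 else m) 0
  tli.filter (fun t => t.1 == m)

-- ===== PRECONDITION & SPEC =====
def Spec_bagmax (tli : List (Int × String)) (out : List (Int × String)) : Prop := out = bagmax_alt tli
instance (tli : List (Int × String)) (out : List (Int × String)) : Decidable (Spec_bagmax tli out) := by unfold Spec_bagmax; infer_instance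

-- ===== CLAIM (what is proved, stated in full; the proofs are below) =====
def Claim_equal_bagmax : Prop := ∀ (tli : List (Int × String)), Dom_bagmax tli → Spec_bagmax tli (bagmax tli)

-- ===== LEMMAS AND PROOFS =====

-- Invariant: processed prefix p (all firsts ≤ c) has ret = p.filter (·.1 == c); the loop ends at the final max.
theorem bagmaxLoop_invariant (l p : List (Int × String)) (c : Int)
    (hp : ∀ t ∈ p, t.1 ≤ c) :
    bagmaxLoop l (p.filter (fun t => t.1 == c)) c =
      ((p ++ l).filter (fun t => t.1 == l.foldl (fun m t => if t.1 > m then t.1 else m) c),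
       l.foldl (fun m t => if t.1 > m then t.1 else m) c) := by
  induction l generalizing p c with
  | nil => simp [bagmaxLoop]
  | cons t l ih =>
    simp only [bagmaxLoop, List.foldl]
    by_cases h1 : t.1 > c
    · simp only [if_pos h1]
      have : [t] = (p ++ [t]).filter (fun s => s.1 == t.1) := by
        rw [List.filter_append]
        have : p.filter (fun s => s.1 == t.1) = [] := by
          apply List.filter_eq_nil_iff.mpr
          intro s hs
          have := hp s hs
          simp only [beq_iff_eq]
          omega
        simp [this]
      rw [this, ih (p ++ [t]) t.1 (by
        intro s hs
        rcases List.mem_append.mp hs with h | h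
        · have := hp s h; omega
        · simp at h; subst h; omega)]
      simp
    · simp only [if_neg h1]
      by_cases h2 : t.1 = c
      · simp only [if_pos h2]
        have : p.filter (fun s => s.1 == c) ++ [t] = (p ++ [t]).filter (fun s => s.1 == c) := by
          rw [List.filter_append]; simp [h2]
        rw [this, ih (p ++ [t]) c (by
          intro s hs
          rcases List.mem_append.mp hs with h | h
          · exact hp s h
          · simp at h; subst h; omega)]
        simp
      · simp only [if_neg h2]
        have : p.filter (fun s => s.1 == c) = (p ++ [t]).filter (fun s => s.1 == c) := by
          rw [List.filter_append]; simp [h2]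
        rw [this, ih (p ++ [t]) c (by
          intro s hs
          rcases List.mem_append.mp hs with h | h
          · exact hp s h
          · simp at h; subst h; omega)]
        simp

-- ===== VERDICT (by name: the statement is the Claim_ definition above) =====
theorem bagmax_spec : Claim_equal_bagmax := by
  intro tli _
  unfold Spec_bagmax bagmax bagmax_alt
  have := bagmaxLoop_invariant tli [] 0 (by simp)
  simpa using congrArg Prod.fst this
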